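-- pv_equiv track=rewrite | github.com/benkajaja/codejam | 2022codejamRound1A/P1_DoubleOrOneThing.py | solve
-- ===== SOURCE A (Python) =====
-- def solve(s):
--     ## init
--     res = ""
--     cur = ""
--
--     ## iterate each character
--     while(s):
--         cur = s[0]*2 + s[1:]
--         if cur < s:
--             res += s[0]*2
--         else:
--             res += s[0]
--         s = s[1:]
--
--     return res
-- ===== SOURCE B (Python) =====
-- def solve(s):
--     out = []
--     dbl = False
--     nxt = None
--     for c in reversed(s):
--         dbl = nxt is not None and (c < nxt or (c == nxt and dbl))
--         out.append(c + c if dbl else c)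
--         nxt = c
--     out.reverse()
--     return ''.join(out)
-- ===== Notes on version B (the rewrite author's own statement) =====
-- stated objective: faster
-- what changed: Replaces A's per-position full-suffix construction and O(n) lexicographic comparison with a single right-to-left pass that propagates one boolean (double iff char < next char, or equal and next is doubled), O(n) instead of O(n^2).
import Mathlib
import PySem

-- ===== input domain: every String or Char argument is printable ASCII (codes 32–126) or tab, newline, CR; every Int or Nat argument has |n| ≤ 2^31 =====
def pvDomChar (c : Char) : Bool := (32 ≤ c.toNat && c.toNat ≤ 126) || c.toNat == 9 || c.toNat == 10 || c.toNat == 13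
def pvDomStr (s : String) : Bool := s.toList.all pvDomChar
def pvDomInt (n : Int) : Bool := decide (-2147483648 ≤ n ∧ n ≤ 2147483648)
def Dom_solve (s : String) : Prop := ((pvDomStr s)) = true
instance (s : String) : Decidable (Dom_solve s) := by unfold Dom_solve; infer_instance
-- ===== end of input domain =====

-- B is an O(n) single right-to-left pass propagating one boolean, replacing A's
-- per-position suffix construction and O(n) string comparison (O(n^2) total).

-- ===== PORT A =====
-- while s: cur = s[0]*2 + s[1:]; res += s[0]*2 if cur < s else s[0]; s = s[1:]
-- (Python string '<' is code-point lexicographic '<' on List Char)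
def solveLoopA : List Char → List Char → List Char
  | [], res => res
  | c :: rest, res =>
    let cur := c :: c :: rest
    if cur < c :: rest then solveLoopA rest (res ++ [c, c])
    else solveLoopA rest (res ++ [c])

def solve (s : String) : String := String.ofList (solveLoopA s.toList [])

-- ===== PORT B =====
-- one step of B's loop body: state is (out, dbl, nxt)
def altStep (st : List (List Char) × Bool × Option Char) (c : Char) :
    List (List Char) × Bool × Option Char :=
  let d : Bool := match st.2.2 with
    | none => false
    | some n => decide (c < n) || (c == n && st.2.1)
  (st.1 ++ [if d then [c, c] else [c]], d, some c)

def solve_alt (s : String) : String :=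
  let st := s.toList.reverse.foldl altStep ([], false, none)
  String.ofList st.1.reverse.flatten

-- ===== PRECONDITION & SPEC =====
def Spec_solve (s : String) (out : String) : Prop := out = solve_alt s
instance (s : String) (out : String) : Decidable (Spec_solve s out) := by unfold Spec_solve; infer_instance

-- ===== CLAIM (what is proved, stated in full; the proofs are below) =====
def Claim_equal_solve : Prop := ∀ (s : String), Dom_solve s → Spec_solve s (solve s)

-- ===== LEMMAS AND PROOFS =====

-- A without the accumulator
def aRec : List Char → List Char
  | [] => []
  | c :: rest => (if c :: c :: rest < c :: rest then [c, c] else [c]) ++ aRec rest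

theorem solveLoopA_eq (s res : List Char) : solveLoopA s res = res ++ aRec s := by
  induction s generalizing res with
  | nil => simp [solveLoopA, aRec]
  | cons c rest ih =>
    simp only [solveLoopA, aRec]
    split <;> simp [ih]

-- B's foldr form
def altF (l : List Char) : List (List Char) × Bool × Option Char :=
  l.foldr (fun c st => altStep st c) ([], false, none)

theorem altF_invariant (l : List Char) :
    (altF l).1.reverse.flatten = aRec l ∧
    (altF l).2.1 = decide (l < l.tail) ∧
    (altF l).2.2 = l.head? := by
  induction l with
  | nil => simp [altF, aRec]
  | cons c rest ih =>
    obtain ⟨h1, h2, h3⟩ := ih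
    have hstep : altF (c :: rest) = altStep (altF rest) c := by
      simp [altF, List.foldr_cons]
    cases rest with
    | nil =>
      simp [altF, altStep, aRec, List.not_lt_nil]
    | cons e r =>
      have hd : (altStep (altF (e :: r)) c).2.1 = decide (c :: e :: r < e :: r) := by
        simp only [altStep, h3, List.head?_cons]
        rw [h2]
        simp only [List.tail_cons, List.cons_lt_cons_iff]
        by_cases hlt : c < e <;> by_cases heq : c = e <;>
          simp [hlt, heq]
      refine ⟨?_, ?_, ?_⟩
      · rw [hstep]
        have hpiece : aRec (c :: e :: r) =
            (if (altStep (altF (e :: r)) c).2.1 = true then [c, c] else [c]) ++ aRec (e :: r) := by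
          rw [hd]
          simp only [aRec, List.cons_lt_cons_self, decide_eq_true_eq]
        rw [hpiece, ← h1]
        simp only [altStep]
        simp
      · rw [hstep, hd]; simp
      · rw [hstep]; simp [altStep]

theorem solve_alt_eq (s : String) : solve_alt s = String.ofList (aRec s.toList) := by
  have h := (altF_invariant s.toList).1
  have e : s.toList.reverse.foldl altStep ([], false, none) = altF s.toList := by
    rw [List.foldl_reverse]; rfl
  simp only [solve_alt, e, h]

-- ===== VERDICT (by name: the statement is the Claim_ definition above) =====
theorem solve_spec : Claim_equal_solve := by
  intro s _
  unfold Spec_solve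
  rw [solve_alt_eq, solve, solveLoopA_eq]
  simp
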